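-- pv_equiv track=rewrite | github.com/AlwafiA/CP125-Class-Repo | labs/lab06/exercise1/exercise1.py | get_legit_power_users
-- ===== SOURCE A (Python) =====
-- def get_legit_power_users(log_data, bot_ids, threshold):
--     user_actions = {}
--
--     for timestamp, user_id, action in log_data:
--         if user_id not in bot_ids:
--             if user_id not in user_actions:
--                 user_actions[user_id] = set()
--
--             # 4. Add the action to the set (sets automatically handle uniqueness)
--             user_actions[user_id].add(action)
--
--     # 5. Filter users based on the unique action count
--     power_users = []
--     for user_id, actions in user_actions.items():
--         if len(actions) > threshold:
--             power_users.append(user_id)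
--
--     # 6. Return the result as a sorted list
--     return sorted(power_users)
-- ===== SOURCE B (Python) =====
-- def get_legit_power_users(log_data, bot_ids, threshold):
--     users = sorted({u for _, u, _ in log_data if u not in bot_ids})
--     return [u for u in users
--             if len({a for _, v, a in log_data if v == u}) > threshold]
-- ===== Notes on version B (the rewrite author's own statement) =====
-- stated objective: simpler
-- what changed: Replaced the dict-of-sets accumulation and items pass by a direct two-line comprehension: sorted set of non-bot users, then for each such user count its distinct actions with a per-user rescan of the log.
import Mathlib
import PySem

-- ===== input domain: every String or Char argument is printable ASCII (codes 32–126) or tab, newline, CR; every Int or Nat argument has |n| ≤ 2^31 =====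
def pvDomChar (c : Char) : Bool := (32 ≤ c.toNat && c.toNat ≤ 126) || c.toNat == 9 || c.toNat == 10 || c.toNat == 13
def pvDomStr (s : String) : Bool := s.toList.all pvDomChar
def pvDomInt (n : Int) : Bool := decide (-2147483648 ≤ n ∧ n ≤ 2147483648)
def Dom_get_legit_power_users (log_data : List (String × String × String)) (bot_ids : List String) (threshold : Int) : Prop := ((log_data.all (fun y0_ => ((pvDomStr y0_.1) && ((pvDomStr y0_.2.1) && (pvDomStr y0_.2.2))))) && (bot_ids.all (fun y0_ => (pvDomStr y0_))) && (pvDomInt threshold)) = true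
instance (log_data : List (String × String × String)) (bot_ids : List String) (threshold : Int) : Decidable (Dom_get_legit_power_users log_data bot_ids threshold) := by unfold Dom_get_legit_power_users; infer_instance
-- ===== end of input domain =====

-- B replaces A's dict-of-sets accumulation and items pass by a direct per-user rescan over
-- the sorted set of non-bot users (simpler decomposition; not claimed faster).

-- ===== PORT A =====
def get_legit_power_users (log_data : List (String × String × String)) (bot_ids : List String) (threshold : Int) : List String :=
  let user_actions : PySem.Dict String (PySem.Set String) :=
    log_data.foldl (fun d e =>
      if !(bot_ids.contains e.2.1) then
        let d := if !(d.contains e.2.1) then d.insert e.2.1 PySem.Set.empty else d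
        d.modify e.2.1 PySem.Set.empty (fun s => PySem.Set.add s e.2.2)
      else d) PySem.Dict.empty
  let power_users : List String :=
    user_actions.items.foldl (fun acc p =>
      if threshold < PySem.Set.len p.2 then acc ++ [p.1] else acc) []
  PySem.List.sorted power_users (fun x => x)

-- ===== PORT B =====
def get_legit_power_users_alt (log_data : List (String × String × String)) (bot_ids : List String) (threshold : Int) : List String :=
  let users : List String :=
    PySem.List.sorted
      (PySem.Set.ofList ((log_data.filter (fun e => !(bot_ids.contains e.2.1))).map (fun e => e.2.1)))
      (fun x => x)
  users.filter (fun u =>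
    threshold < PySem.Set.len
      (PySem.Set.ofList ((log_data.filter (fun e => e.2.1 == u)).map (fun e => e.2.2))))

-- ===== PRECONDITION & SPEC =====
def Spec_get_legit_power_users (log_data : List (String × String × String)) (bot_ids : List String) (threshold : Int) (out : List String) : Prop := out = get_legit_power_users_alt log_data bot_ids threshold
instance (log_data : List (String × String × String)) (bot_ids : List String) (threshold : Int) (out : List String) : Decidable (Spec_get_legit_power_users log_data bot_ids threshold out) := by unfold Spec_get_legit_power_users; infer_instance

-- ===== CLAIM (what is proved, stated in full; the proofs are below) =====
def Claim_equal_get_legit_power_users : Prop := ∀ (log_data : List (String × String × String)) (bot_ids : List String) (threshold : Int), Dom_get_legit_power_users log_data bot_ids threshold → Spec_get_legit_power_users log_data bot_ids threshold (get_legit_power_users log_data bot_ids threshold)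

-- ===== LEMMAS AND PROOFS =====

-- A's loop body equals one uniform `modify` (set-default-then-add is modify with default ∅).
lemma stepA_eq_modify (d : PySem.Dict String (PySem.Set String)) (u a : String) :
    ((if d.contains u = false then d.insert u [] else d).modify u [] fun s => s.add a)
    = d.modify u [] fun s => s.add a := by
  by_cases h : d.contains u = true
  · simp [h]
  · simp only [Bool.not_eq_true] at h
    rw [if_pos h]
    simp [PySem.Dict.modify, PySem.Dict.insert_insert_self, PySem.Dict.getD_insert_self,
      PySem.Dict.getD_of_not_contains _ _ h]

-- value of the modify-loop at a key: the actions of that key, in order, folded into a set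
lemma getD_foldl_modify_setadd (l : List (String × String × String))
    (d : PySem.Dict String (PySem.Set String)) (u : String) :
    (l.foldl (fun d e => d.modify e.2.1 PySem.Set.empty (fun s => PySem.Set.add s e.2.2)) d).getD u PySem.Set.empty
    = ((l.filter (fun e => e.2.1 == u)).map (fun e => e.2.2)).foldl PySem.Set.add (d.getD u PySem.Set.empty) := by
  induction l generalizing d with
  | nil => rfl
  | cons e t ih =>
    simp only [List.foldl_cons, ih, List.filter_cons]
    by_cases h : e.2.1 = u
    · simp [h]
    · have hb : (e.2.1 == u) = false := beq_eq_false_iff_ne.mpr h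
      rw [PySem.Dict.getD_modify]
      simp [hb, Ne.symm h]

-- sorting commutes with filtering a duplicate-free list
lemma sorted_filter_comm (xs : List String) (p : String → Bool) (h : xs.Nodup) :
    PySem.List.sorted (xs.filter p) (fun x => x)
    = (PySem.List.sorted xs (fun x => x)).filter p := by
  apply PySem.List.sorted_eq_of_perm_of_pairwise_lt
  · exact (PySem.List.sorted_perm xs (fun x => x) false).filter p
  · have hle := PySem.List.sorted_pairwise xs (fun x => x)
    have hnd : (PySem.List.sorted xs (fun x => x)).Nodup :=
      (PySem.List.sorted_perm xs (fun x => x) false).nodup_iff.mpr h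
    have hlt : (PySem.List.sorted xs (fun x => x)).Pairwise (fun a b => a < b) := by
      have := List.Pairwise.and hle hnd
      exact this.imp (fun hab => lt_of_le_of_ne hab.1 hab.2)
    exact hlt.sublist List.filter_sublist

theorem get_legit_power_users_spec_aux (log_data : List (String × String × String))
    (bot_ids : List String) (threshold : Int) :
    get_legit_power_users log_data bot_ids threshold
    = get_legit_power_users_alt log_data bot_ids threshold := by
  show PySem.List.sorted
      (((log_data.foldl (fun d e =>
          if !(bot_ids.contains e.2.1) then
            let d' := if !(d.contains e.2.1) then d.insert e.2.1 PySem.Set.empty else d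
            d'.modify e.2.1 PySem.Set.empty (fun s => PySem.Set.add s e.2.2)
          else d) PySem.Dict.empty).items).foldl
        (fun acc p => if threshold < PySem.Set.len p.2 then acc ++ [p.1] else acc) [])
      (fun x => x)
    = (PySem.List.sorted
        (PySem.Set.ofList ((log_data.filter (fun e => !(bot_ids.contains e.2.1))).map (fun e => e.2.1)))
        (fun x => x)).filter
        (fun u => threshold < PySem.Set.len
          (PySem.Set.ofList ((log_data.filter (fun e => e.2.1 == u)).map (fun e => e.2.2))))
  set nb : (String × String × String) → Bool := fun e => !(bot_ids.contains e.2.1) with hnb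
  -- the dict after the loop, in uniform modify form
  have hloop : (log_data.foldl (fun d e =>
      if nb e then
        let d' := if !(d.contains e.2.1) then d.insert e.2.1 PySem.Set.empty else d
        d'.modify e.2.1 PySem.Set.empty (fun s => PySem.Set.add s e.2.2)
      else d) PySem.Dict.empty)
      = (log_data.filter nb).foldl
          (fun d e => d.modify e.2.1 PySem.Set.empty (fun s => PySem.Set.add s e.2.2)) PySem.Dict.empty := by
    rw [← PySem.List.foldl_if_eq_foldl_filter nb
      (fun d e => d.modify e.2.1 PySem.Set.empty (fun s => PySem.Set.add s e.2.2)) log_data PySem.Dict.empty]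
    exact PySem.List.foldl_congr_mem _ _ _ _ (fun d e _ => by
      by_cases h : nb e = true <;> simp [h, stepA_eq_modify])
  rw [hloop]
  set D := (log_data.filter nb).foldl
      (fun d e => d.modify e.2.1 PySem.Set.empty (fun s => PySem.Set.add s e.2.2)) PySem.Dict.empty with hD
  set U : List String := PySem.Set.ofList ((log_data.filter nb).map (fun e => e.2.1)) with hU
  -- keys of the dict = the set of non-bot user ids, in first-occurrence order
  have hkeys : D.keys = U := by
    rw [hD]
    rw [PySem.Dict.keys_foldl_modify_key (l := log_data.filter nb) (key := fun e => e.2.1)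
      (d0 := PySem.Set.empty) (f := fun _ e s => PySem.Set.add s e.2.2)]
    rw [hU, PySem.Set.ofList_eq_foldl]
    rfl
  have hnodupU : U.Nodup := PySem.Set.nodup_ofList _
  have hnodup : D.keys.Nodup := hkeys ▸ hnodupU
  -- every key is a non-bot id
  have hUnb : ∀ u ∈ U, u ∉ bot_ids := by
    intro u hu
    rw [hU] at hu
    have hu' := (PySem.Set.mem_ofList _ _).mp hu
    obtain ⟨e, he, heq⟩ := List.mem_map.mp hu'
    have h2 := (List.mem_filter.mp he).2
    rw [hnb] at h2
    simp only [Bool.not_eq_true'] at h2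
    rw [← heq]
    simpa using h2
  -- value at a key u of the dict = B's action set for u
  have hval : ∀ u ∈ U, D.getD u PySem.Set.empty
      = PySem.Set.ofList ((log_data.filter (fun e => e.2.1 == u)).map (fun e => e.2.2)) := by
    intro u hu
    rw [hD, getD_foldl_modify_setadd]
    have hff : (log_data.filter nb).filter (fun e => e.2.1 == u)
        = log_data.filter (fun e => e.2.1 == u) := by
      rw [List.filter_filter]
      refine List.filter_congr (fun e _ => ?_)
      by_cases h : e.2.1 = u
      · simp [hnb, h, hUnb u hu]
      · simp [beq_eq_false_iff_ne.mpr h]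
    rw [hff]
    simp [PySem.Set.ofList_eq_foldl, List.foldl_map, PySem.Dict.getD_empty, PySem.Set.empty]
  -- A's filter loop over items = filter over the sorted key set
  rw [PySem.List.foldl_append_ite (p := fun p : String × PySem.Set String => threshold < PySem.Set.len p.2)
    (f := fun p : String × PySem.Set String => p.1)]
  rw [PySem.Dict.items_eq_map_keys D hnodup PySem.Set.empty, hkeys]
  rw [List.filter_map, List.map_map]
  rw [show ((fun u : String × PySem.Set String => u.1) ∘ (fun k : String => (k, D.getD k PySem.Set.empty))) = id from rfl]
  rw [List.map_id, List.nil_append]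
  have hfc : U.filter ((fun p : String × PySem.Set String => decide (threshold < PySem.Set.len p.2)) ∘
        (fun k => (k, D.getD k PySem.Set.empty)))
      = U.filter (fun u => threshold < PySem.Set.len
          (PySem.Set.ofList ((log_data.filter (fun e => e.2.1 == u)).map (fun e => e.2.2)))) := by
    refine List.filter_congr (fun u hu => ?_)
    simp only [Function.comp, hval u hu]
  rw [hfc]
  exact sorted_filter_comm U _ hnodupU

-- ===== VERDICT (by name: the statement is the Claim_ definition above) =====
theorem get_legit_power_users_spec : Claim_equal_get_legit_power_users := by
  intro log_data bot_ids threshold _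
  exact get_legit_power_users_spec_aux log_data bot_ids threshold
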